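-- pv_equiv track=rewrite | github.com/liyongke/OpenVPN | vpn-portal-phase1-readonly/app/services/openvpn_reader.py | _infer_device
-- ===== SOURCE A (Python) =====
-- def _apply_device_hints(
--     username: str,
--     common_name: str,
--     real_address: str,
--     device_hints: dict[str, dict[str, tuple[str, str]]],
-- ) -> tuple[str, str] | None:
--     users = device_hints.get("users", {})
--     common_names = device_hints.get("common_names", {})
--     real_addresses = device_hints.get("real_addresses", {})
--
--     user_key = username.strip().lower()
--     if user_key in users:
--         return users[user_key]
--
--     cn_key = common_name.strip().lower()
--     if cn_key in common_names:
--         return common_names[cn_key]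
--
--     ip_key = real_address.strip().lower().split(":", 1)[0]
--     if ip_key in real_addresses:
--         return real_addresses[ip_key]
--
--     return None
--
-- def _infer_device(
--     username: str,
--     common_name: str,
--     real_address: str,
--     device_hints: dict[str, dict[str, tuple[str, str]]],
-- ) -> tuple[str, str]:
--     hinted = _apply_device_hints(username, common_name, real_address, device_hints)
--     if hinted:
--         return hinted
--
--     text = f"{username} {common_name}".lower()
--
--     if any(token in text for token in ["ios", "iphone", "ipad", "android", "phone", "mobile"]):
--         if "ios" in text or "iphone" in text or "ipad" in text:
--             return "phone", "ios"
--         if "android" in text: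
--             return "phone", "android"
--         return "phone", "unknown"
--
--     if any(token in text for token in ["windows", "win", "mac", "linux", "desktop", "laptop", "pc"]):
--         if "windows" in text or " win" in text:
--             return "pc", "windows"
--         if "mac" in text:
--             return "pc", "mac"
--         if "linux" in text:
--             return "pc", "linux"
--         return "pc", "unknown"
--
--     return "unknown", "unknown"
-- ===== SOURCE B (Python) =====
-- _RULES = [
--     (("ios", "iphone", "ipad"), ("phone", "ios")),
--     (("android",), ("phone", "android")),
--     (("phone", "mobile"), ("phone", "unknown")),
--     (("windows", " win"), ("pc", "windows")),
--     (("mac",), ("pc", "mac")),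
--     (("linux",), ("pc", "linux")),
--     (("win", "desktop", "laptop", "pc"), ("pc", "unknown")),
-- ]
--
--
-- def _infer_device(username, common_name, real_address, device_hints):
--     lookups = [
--         ("users", username.strip().lower()),
--         ("common_names", common_name.strip().lower()),
--         ("real_addresses", real_address.strip().lower().split(":", 1)[0]),
--     ]
--     for section, key in lookups:
--         hit = device_hints.get(section, {}).get(key)
--         if hit is not None:
--             return hit
--     text = " ".join((username, common_name)).lower()
--     for tokens, result in _RULES:
--         if any(t in text for t in tokens):
--             return result
--     return ("unknown", "unknown")
-- ===== Notes on version B (the rewrite author's own statement) =====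
-- stated objective: simpler
-- what changed: Replaced the nested gate-then-subclassify branch tree with a single pass over an ordered (tokens -> result) rule table, and the three hand-written hint-dict checks with one loop over a (section, key) lookup list.
import Mathlib
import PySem

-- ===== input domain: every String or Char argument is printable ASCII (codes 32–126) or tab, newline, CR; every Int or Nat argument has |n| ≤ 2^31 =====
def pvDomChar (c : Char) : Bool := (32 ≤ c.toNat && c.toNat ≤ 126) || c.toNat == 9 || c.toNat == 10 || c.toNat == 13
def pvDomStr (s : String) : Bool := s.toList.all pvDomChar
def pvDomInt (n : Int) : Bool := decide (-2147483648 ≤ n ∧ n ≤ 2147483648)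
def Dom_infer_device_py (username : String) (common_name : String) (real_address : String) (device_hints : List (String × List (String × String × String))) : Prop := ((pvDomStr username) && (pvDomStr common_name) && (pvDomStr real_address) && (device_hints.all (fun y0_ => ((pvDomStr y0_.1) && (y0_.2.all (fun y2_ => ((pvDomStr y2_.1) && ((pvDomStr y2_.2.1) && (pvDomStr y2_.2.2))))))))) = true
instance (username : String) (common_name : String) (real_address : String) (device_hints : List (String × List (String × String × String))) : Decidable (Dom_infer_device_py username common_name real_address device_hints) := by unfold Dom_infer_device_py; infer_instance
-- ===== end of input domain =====

-- B replaces A's nested gate-then-subclassify branch tree by a single pass over an ordered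
-- token→result rule table, and the three hand-written hint-dict checks by one loop over a
-- (section, key) list; objective: simpler (same cost).

-- ===== PORT A =====
-- Python helper _apply_device_hints, transliterated. Membership test + indexing on a dict is
-- its first-match lookup (Dict.get?). split(":",1)[0]: sep ≠ "" so splitMax? is `some`, and
-- split never returns an empty list, so headD "" is exact.
def apply_device_hints_py (username : String) (common_name : String) (real_address : String)
    (device_hints : List (String × List (String × String × String))) : Option (String × String) :=
  let dh := PySem.Dict.mk device_hints
  let users : PySem.Dict String (String × String) := PySem.Dict.mk (PySem.Dict.getD dh "users" [])
  let common_names : PySem.Dict String (String × String) := PySem.Dict.mk (PySem.Dict.getD dh "common_names" [])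
  let real_addresses : PySem.Dict String (String × String) := PySem.Dict.mk (PySem.Dict.getD dh "real_addresses" [])
  let user_key := PySem.Str.lower (PySem.Str.strip username)
  match PySem.Dict.get? users user_key with
  | some v => some v
  | none =>
    let cn_key := PySem.Str.lower (PySem.Str.strip common_name)
    match PySem.Dict.get? common_names cn_key with
    | some v => some v
    | none =>
      let ip_key := ((PySem.Str.splitMax? (PySem.Str.lower (PySem.Str.strip real_address)) ":" 1).getD []).headD ""
      match PySem.Dict.get? real_addresses ip_key with
      | some v => some v
      | none => none

def infer_device_py (username : String) (common_name : String) (real_address : String) (device_hints : List (String × List (String × String × String))) : String × String :=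
  match apply_device_hints_py username common_name real_address device_hints with
  | some hinted => hinted
  | none =>
    let text := PySem.Str.lower (PySem.Str.join " " [username, common_name])
    if ["ios", "iphone", "ipad", "android", "phone", "mobile"].any (fun token => PySem.Str.isIn token text) then
      if PySem.Str.isIn "ios" text || PySem.Str.isIn "iphone" text || PySem.Str.isIn "ipad" text then ("phone", "ios")
      else if PySem.Str.isIn "android" text then ("phone", "android")
      else ("phone", "unknown")
    else if ["windows", "win", "mac", "linux", "desktop", "laptop", "pc"].any (fun token => PySem.Str.isIn token text) then
      if PySem.Str.isIn "windows" text || PySem.Str.isIn " win" text then ("pc", "windows")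
      else if PySem.Str.isIn "mac" text then ("pc", "mac")
      else if PySem.Str.isIn "linux" text then ("pc", "linux")
      else ("pc", "unknown")
    else ("unknown", "unknown")

-- ===== PORT B =====
def pvRules : List (List String × (String × String)) :=
  [(["ios", "iphone", "ipad"], ("phone", "ios")),
   (["android"], ("phone", "android")),
   (["phone", "mobile"], ("phone", "unknown")),
   (["windows", " win"], ("pc", "windows")),
   (["mac"], ("pc", "mac")),
   (["linux"], ("pc", "linux")),
   (["win", "desktop", "laptop", "pc"], ("pc", "unknown"))]

-- B's first loop: first hit over the (section, key) lookup list
def pvLoopHints (dh : PySem.Dict String (List (String × String × String))) :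
    List (String × String) → Option (String × String)
  | [] => none
  | (sect, key) :: rest =>
    match PySem.Dict.get? (PySem.Dict.mk (PySem.Dict.getD dh sect [])) key with
    | some hit => some hit
    | none => pvLoopHints dh rest

-- B's second loop: first matching rule of the table
def pvLoopRules (text : String) : List (List String × (String × String)) → String × String
  | [] => ("unknown", "unknown")
  | (tokens, result) :: rest =>
    if tokens.any (fun t => PySem.Str.isIn t text) then result else pvLoopRules text rest

def infer_device_py_alt (username : String) (common_name : String) (real_address : String) (device_hints : List (String × List (String × String × String))) : String × String :=
  let dh := PySem.Dict.mk device_hints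
  let lookups : List (String × String) :=
    [("users", PySem.Str.lower (PySem.Str.strip username)),
     ("common_names", PySem.Str.lower (PySem.Str.strip common_name)),
     ("real_addresses", ((PySem.Str.splitMax? (PySem.Str.lower (PySem.Str.strip real_address)) ":" 1).getD []).headD "")]
  match pvLoopHints dh lookups with
  | some hit => hit
  | none =>
    let text := PySem.Str.lower (PySem.Str.join " " [username, common_name])
    pvLoopRules text pvRules

-- ===== PRECONDITION & SPEC =====
def Spec_infer_device_py (username : String) (common_name : String) (real_address : String) (device_hints : List (String × List (String × String × String))) (out : String × String) : Prop := out = infer_device_py_alt username common_name real_address device_hints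
instance (username : String) (common_name : String) (real_address : String) (device_hints : List (String × List (String × String × String))) (out : String × String) : Decidable (Spec_infer_device_py username common_name real_address device_hints out) := by unfold Spec_infer_device_py; infer_instance

-- ===== CLAIM (what is proved, stated in full; the proofs are below) =====
def Claim_equal_infer_device_py : Prop := ∀ (username : String) (common_name : String) (real_address : String) (device_hints : List (String × List (String × String × String))), Dom_infer_device_py username common_name real_address device_hints → Spec_infer_device_py username common_name real_address device_hints (infer_device_py username common_name real_address device_hints)

-- ===== LEMMAS AND PROOFS =====

-- " win" in text implies "win" in text (infix transitivity)
lemma pv_win_mono (text : String) (h : PySem.Str.isIn " win" text = true) :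
    PySem.Str.isIn "win" text = true := by
  rw [PySem.Str.isIn_iff_infix] at h ⊢
  exact List.IsInfix.trans (by decide) h

-- propositional core: A's gate+subclassify tree equals B's rule table, as functions of the
-- fourteen token tests, given only that " win" present implies "win" present (c9 → c8)
lemma pv_table_eq_tree (c1 c2 c3 c4 c5 c6 c7 c8 c9 c10 c11 c12 c13 c14 : Bool)
    (h : c9 = true → c8 = true) :
    (if c1 || (c2 || (c3 || (c4 || (c5 || (c6 || false))))) then
      if c1 || c2 || c3 then (("phone", "ios") : String × String)
      else if c4 then ("phone", "android")
      else ("phone", "unknown")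
    else if c7 || (c8 || (c10 || (c11 || (c12 || (c13 || (c14 || false)))))) then
      if c7 || c9 then ("pc", "windows")
      else if c10 then ("pc", "mac")
      else if c11 then ("pc", "linux")
      else ("pc", "unknown")
    else ("unknown", "unknown")) =
    (if c1 || (c2 || (c3 || false)) then ("phone", "ios")
    else if c4 || false then ("phone", "android")
    else if c5 || (c6 || false) then ("phone", "unknown")
    else if c7 || (c9 || false) then ("pc", "windows")
    else if c10 || false then ("pc", "mac")
    else if c11 || false then ("pc", "linux")
    else if c8 || (c12 || (c13 || (c14 || false))) then ("pc", "unknown")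
    else ("unknown", "unknown")) := by
  revert h
  revert c1 c2 c3 c4 c5 c6 c7 c8 c9 c10 c11 c12 c13 c14
  decide

-- A's fallback branch tree equals B's rule-table pass, for every text
lemma pv_fallback_eq (text : String) :
    (if ["ios", "iphone", "ipad", "android", "phone", "mobile"].any (fun token => PySem.Str.isIn token text) then
      if PySem.Str.isIn "ios" text || PySem.Str.isIn "iphone" text || PySem.Str.isIn "ipad" text then ("phone", "ios")
      else if PySem.Str.isIn "android" text then ("phone", "android")
      else ("phone", "unknown")
    else if ["windows", "win", "mac", "linux", "desktop", "laptop", "pc"].any (fun token => PySem.Str.isIn token text) then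
      if PySem.Str.isIn "windows" text || PySem.Str.isIn " win" text then ("pc", "windows")
      else if PySem.Str.isIn "mac" text then ("pc", "mac")
      else if PySem.Str.isIn "linux" text then ("pc", "linux")
      else ("pc", "unknown")
    else (("unknown", "unknown") : String × String)) = pvLoopRules text pvRules := by
  simp only [pvRules, pvLoopRules, List.any_cons, List.any_nil]
  exact pv_table_eq_tree _ _ _ _ _ _ _ _ _ _ _ _ _ _ (pv_win_mono text)

-- ===== VERDICT (by name: the statement is the Claim_ definition above) =====
theorem infer_device_py_spec : Claim_equal_infer_device_py := by
  intro username common_name real_address device_hints _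
  unfold Spec_infer_device_py
  unfold infer_device_py infer_device_py_alt apply_device_hints_py
  simp only [pvLoopHints]
  cases PySem.Dict.get? (PySem.Dict.mk (PySem.Dict.getD (PySem.Dict.mk device_hints) "users" []))
      (PySem.Str.lower (PySem.Str.strip username)) with
  | some v => rfl
  | none =>
    cases PySem.Dict.get? (PySem.Dict.mk (PySem.Dict.getD (PySem.Dict.mk device_hints) "common_names" []))
        (PySem.Str.lower (PySem.Str.strip common_name)) with
    | some v => rfl
    | none =>
      cases PySem.Dict.get? (PySem.Dict.mk (PySem.Dict.getD (PySem.Dict.mk device_hints) "real_addresses" []))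
          (((PySem.Str.splitMax? (PySem.Str.lower (PySem.Str.strip real_address)) ":" 1).getD []).headD "") with
      | some v => rfl
      | none => exact pv_fallback_eq _
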